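-- pv_equiv track=rewrite | github.com/julija777/ai-github-repo-summariser | main.py | infer_technologies
-- ===== SOURCE A (Python) =====
-- def infer_technologies(tree, readmes):
--     tech = []
--     paths = [item.get("path", "") for item in tree if item.get("type") == "blob"]
--     path_set = set(paths)
--     lower_readmes = (readmes or "").lower()
--
--     if any(p.endswith(".py") for p in paths):
--         tech.append("Python")
--     if "requirements.txt" in path_set or "pyproject.toml" in path_set:
--         tech.append("FastAPI")
--     if "package.json" in path_set:
--         tech.extend(["JavaScript", "Node.js"])
--     if any(p.endswith((".ts", ".tsx")) for p in paths):
--         tech.append("TypeScript")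
--     if any("dockerfile" in p.lower() for p in paths):
--         tech.append("Docker")
--     if "react" in lower_readmes:
--         tech.append("React")
--     if "next.js" in lower_readmes or "nextjs" in lower_readmes:
--         tech.append("Next.js")
--
--     if not tech:
--         tech.append("GitHub-hosted source code")
--     return list(dict.fromkeys(tech))
-- ===== SOURCE B (Python) =====
-- def infer_technologies(tree, readmes):
--     # One pass over the tree: set boolean flags instead of building paths/path_set
--     # and scanning them three more times.
--     has_py = has_req = has_pyproject = has_pkg = has_ts = has_docker = False
--     for item in tree:
--         if item.get("type") == "blob":
--             p = item.get("path", "")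
--             has_py = has_py or p.endswith(".py")
--             has_req = has_req or p == "requirements.txt"
--             has_pyproject = has_pyproject or p == "pyproject.toml"
--             has_pkg = has_pkg or p == "package.json"
--             has_ts = has_ts or p.endswith(".ts") or p.endswith(".tsx")
--             has_docker = has_docker or "dockerfile" in p.lower()
--     r = (readmes or "").lower()
--     tech = (
--         (["Python"] if has_py else [])
--         + (["FastAPI"] if has_req or has_pyproject else [])
--         + (["JavaScript", "Node.js"] if has_pkg else [])
--         + (["TypeScript"] if has_ts else [])
--         + (["Docker"] if has_docker else [])
--         + (["React"] if "react" in r else [])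
--         + (["Next.js"] if "next.js" in r or "nextjs" in r else [])
--     )
--     return tech or ["GitHub-hosted source code"]
-- ===== Notes on version B (the rewrite author's own statement) =====
-- stated objective: alternative
-- what changed: Replaces the paths list, the set, and three separate any(...) scans with a single pass over the tree that sets six boolean flags, then assembles the technology list by concatenating conditional segments (no dedup needed since each tag is appended at most once).
import Mathlib
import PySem

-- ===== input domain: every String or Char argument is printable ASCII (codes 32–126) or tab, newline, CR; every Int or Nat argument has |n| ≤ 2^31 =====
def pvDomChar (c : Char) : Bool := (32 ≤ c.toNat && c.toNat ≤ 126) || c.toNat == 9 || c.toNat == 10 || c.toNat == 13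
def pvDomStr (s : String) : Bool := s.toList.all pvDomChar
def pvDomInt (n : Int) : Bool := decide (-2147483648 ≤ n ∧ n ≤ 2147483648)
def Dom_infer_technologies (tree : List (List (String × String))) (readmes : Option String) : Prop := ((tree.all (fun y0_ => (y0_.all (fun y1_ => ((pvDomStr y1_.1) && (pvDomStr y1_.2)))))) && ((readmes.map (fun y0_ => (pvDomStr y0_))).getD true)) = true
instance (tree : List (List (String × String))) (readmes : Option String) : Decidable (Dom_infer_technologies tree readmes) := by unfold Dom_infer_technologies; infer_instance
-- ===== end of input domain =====

-- B fuses A's four scans into a single flag-setting pass over the tree and skips the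
-- (always-identity) dedup; objective: alternative single-pass decomposition, same cost.

-- ===== PORT A =====
def infer_technologies (tree : List (List (String × String))) (readmes : Option String) : List String :=
  let tech : List String := []
  let paths := (tree.filter (fun item => (PySem.Dict.mk item).get? "type" == some "blob")).map
      (fun item => (PySem.Dict.mk item).getD "path" "")
  let path_set := PySem.Set.ofList paths
  let lower_readmes := PySem.Str.lower (readmes.getD "")
  let tech := if paths.any (fun p => PySem.Str.endswith p ".py") then tech ++ ["Python"] else tech
  let tech := if PySem.Set.contains path_set "requirements.txt" || PySem.Set.contains path_set "pyproject.toml" then tech ++ ["FastAPI"] else tech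
  let tech := if PySem.Set.contains path_set "package.json" then tech ++ ["JavaScript", "Node.js"] else tech
  let tech := if paths.any (fun p => PySem.Str.endswith p ".ts" || PySem.Str.endswith p ".tsx") then tech ++ ["TypeScript"] else tech
  let tech := if paths.any (fun p => PySem.Str.isIn "dockerfile" (PySem.Str.lower p)) then tech ++ ["Docker"] else tech
  let tech := if PySem.Str.isIn "react" lower_readmes then tech ++ ["React"] else tech
  let tech := if PySem.Str.isIn "next.js" lower_readmes || PySem.Str.isIn "nextjs" lower_readmes then tech ++ ["Next.js"] else tech
  let tech := if tech = [] then tech ++ ["GitHub-hosted source code"] else tech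
  PySem.List.dedup tech

-- ===== PORT B =====
-- the flag tuple: (has_py, has_req, has_pyproject, has_pkg, has_ts, has_docker)
def pvBStep (f : Bool × Bool × Bool × Bool × Bool × Bool) (item : List (String × String)) :
    Bool × Bool × Bool × Bool × Bool × Bool :=
  if (PySem.Dict.mk item).get? "type" == some "blob" then
    let p := (PySem.Dict.mk item).getD "path" ""
    (f.1 || PySem.Str.endswith p ".py",
     f.2.1 || p == "requirements.txt",
     f.2.2.1 || p == "pyproject.toml",
     f.2.2.2.1 || p == "package.json",
     f.2.2.2.2.1 || (PySem.Str.endswith p ".ts" || PySem.Str.endswith p ".tsx"),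
     f.2.2.2.2.2 || PySem.Str.isIn "dockerfile" (PySem.Str.lower p))
  else f

def infer_technologies_alt (tree : List (List (String × String))) (readmes : Option String) : List String :=
  let f := tree.foldl pvBStep (false, false, false, false, false, false)
  let r := PySem.Str.lower (readmes.getD "")
  let tech :=
    (if f.1 then ["Python"] else []) ++
    (if f.2.1 || f.2.2.1 then ["FastAPI"] else []) ++
    (if f.2.2.2.1 then ["JavaScript", "Node.js"] else []) ++
    (if f.2.2.2.2.1 then ["TypeScript"] else []) ++
    (if f.2.2.2.2.2 then ["Docker"] else []) ++
    (if PySem.Str.isIn "react" r then ["React"] else []) ++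
    (if PySem.Str.isIn "next.js" r || PySem.Str.isIn "nextjs" r then ["Next.js"] else [])
  if tech = [] then ["GitHub-hosted source code"] else tech

-- ===== PRECONDITION & SPEC =====
def Spec_infer_technologies (tree : List (List (String × String))) (readmes : Option String) (out : List String) : Prop := out = infer_technologies_alt tree readmes
instance (tree : List (List (String × String))) (readmes : Option String) (out : List String) : Decidable (Spec_infer_technologies tree readmes out) := by unfold Spec_infer_technologies; infer_instance

-- ===== CLAIM (what is proved, stated in full; the proofs are below) =====
def Claim_equal_infer_technologies : Prop := ∀ (tree : List (List (String × String))) (readmes : Option String), Dom_infer_technologies tree readmes → Spec_infer_technologies tree readmes (infer_technologies tree readmes)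

-- ===== LEMMAS AND PROOFS =====

-- B's one-pass fold computes the same flags as A's separate scans over pvPaths
theorem pvFold_eq (tree : List (List (String × String)))
    (f : Bool × Bool × Bool × Bool × Bool × Bool) :
    tree.foldl pvBStep f =
      (f.1 || ((tree.filter (fun item => (PySem.Dict.mk item).get? "type" == some "blob")).map (fun item => (PySem.Dict.mk item).getD "path" "")).any (fun p => PySem.Str.endswith p ".py"),
       f.2.1 || ((tree.filter (fun item => (PySem.Dict.mk item).get? "type" == some "blob")).map (fun item => (PySem.Dict.mk item).getD "path" "")).any (fun p => p == "requirements.txt"),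
       f.2.2.1 || ((tree.filter (fun item => (PySem.Dict.mk item).get? "type" == some "blob")).map (fun item => (PySem.Dict.mk item).getD "path" "")).any (fun p => p == "pyproject.toml"),
       f.2.2.2.1 || ((tree.filter (fun item => (PySem.Dict.mk item).get? "type" == some "blob")).map (fun item => (PySem.Dict.mk item).getD "path" "")).any (fun p => p == "package.json"),
       f.2.2.2.2.1 || ((tree.filter (fun item => (PySem.Dict.mk item).get? "type" == some "blob")).map (fun item => (PySem.Dict.mk item).getD "path" "")).any (fun p => PySem.Str.endswith p ".ts" || PySem.Str.endswith p ".tsx"),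
       f.2.2.2.2.2 || ((tree.filter (fun item => (PySem.Dict.mk item).get? "type" == some "blob")).map (fun item => (PySem.Dict.mk item).getD "path" "")).any (fun p => PySem.Str.isIn "dockerfile" (PySem.Str.lower p))) := by
  induction tree generalizing f with
  | nil => simp
  | cons item rest ih =>
    simp only [List.foldl_cons, ih, List.filter_cons]
    by_cases h : ((PySem.Dict.mk item).get? "type" == some "blob") = true
    · simp [pvBStep, h, Bool.or_assoc]
    · simp [pvBStep, h]

-- membership in set(paths) is an any-scan of paths
theorem pvContains_eq (l : List String) (v : String) :
    PySem.Set.contains (PySem.Set.ofList l) v = l.any (fun p => p == v) := by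
  have h1 : PySem.Set.contains (PySem.Set.ofList l) v = true ↔ v ∈ l := by
    simp [PySem.Set.contains, PySem.Set.mem_ofList]
  have h2 : l.any (fun p => p == v) = true ↔ v ∈ l := by
    simp [List.any_eq_true]
  cases hc : PySem.Set.contains (PySem.Set.ofList l) v <;>
    cases ha : l.any (fun p => p == v) <;> simp_all

-- the pure boolean shape of both programs: A's append chain + dedup = B's segment concatenation
theorem pvBuild_eq (c1 c2 c3 c4 c5 c6 c7 : Bool) :
    (let tech : List String := []
     let tech := if c1 then tech ++ ["Python"] else tech
     let tech := if c2 then tech ++ ["FastAPI"] else tech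
     let tech := if c3 then tech ++ ["JavaScript", "Node.js"] else tech
     let tech := if c4 then tech ++ ["TypeScript"] else tech
     let tech := if c5 then tech ++ ["Docker"] else tech
     let tech := if c6 then tech ++ ["React"] else tech
     let tech := if c7 then tech ++ ["Next.js"] else tech
     let tech := if tech = [] then tech ++ ["GitHub-hosted source code"] else tech
     PySem.List.dedup tech) =
    (let tech :=
       (if c1 then ["Python"] else []) ++
       (if c2 then ["FastAPI"] else []) ++
       (if c3 then ["JavaScript", "Node.js"] else []) ++
       (if c4 then ["TypeScript"] else []) ++
       (if c5 then ["Docker"] else []) ++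
       (if c6 then ["React"] else []) ++
       (if c7 then ["Next.js"] else [])
     if tech = [] then ["GitHub-hosted source code"] else tech) := by
  cases c1 <;> cases c2 <;> cases c3 <;> cases c4 <;> cases c5 <;> cases c6 <;> cases c7 <;> decide

-- ===== VERDICT (by name: the statement is the Claim_ definition above) =====
theorem infer_technologies_spec : Claim_equal_infer_technologies := by
  intro tree readmes _
  unfold Spec_infer_technologies infer_technologies infer_technologies_alt
  rw [pvFold_eq tree (false, false, false, false, false, false)]
  simp only [Bool.false_or, pvContains_eq]
  exact pvBuild_eq _ _ _ _ _ _ _
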